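-- pv_equiv track=rewrite | github.com/moevm/document_insight_system | app/nlp/text_similarity.py | get_bag_of_n_gramms
-- ===== SOURCE A (Python) =====
-- def get_bag_of_n_gramms(corpus):
--     new_corpus = []
--     for item in corpus:
--         for n_gramm in item:
--             new_corpus.append(n_gramm)
--     index_word = {}
--     i = 0
--     for word in new_corpus:
--         if word in index_word.keys():
--             continue
--         index_word[word] = i
--         i += 1
--     return index_word
-- ===== SOURCE B (Python) =====
-- def get_bag_of_n_gramms(corpus):
--     flat = [word for item in corpus for word in item]
--     return {word: len(set(flat[:flat.index(word)])) for word in flat}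
-- ===== Notes on version B (the rewrite author's own statement) =====
-- stated objective: alternative
-- what changed: Instead of A's incremental counter with a membership guard, B computes each word's index non-incrementally as the number of distinct words strictly before its first occurrence (len(set(flat[:flat.index(word)]))), rebuilding the mapping by repeated overwriting inserts; it trades O(n) for O(n^2) but needs no running state.
import Mathlib
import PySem

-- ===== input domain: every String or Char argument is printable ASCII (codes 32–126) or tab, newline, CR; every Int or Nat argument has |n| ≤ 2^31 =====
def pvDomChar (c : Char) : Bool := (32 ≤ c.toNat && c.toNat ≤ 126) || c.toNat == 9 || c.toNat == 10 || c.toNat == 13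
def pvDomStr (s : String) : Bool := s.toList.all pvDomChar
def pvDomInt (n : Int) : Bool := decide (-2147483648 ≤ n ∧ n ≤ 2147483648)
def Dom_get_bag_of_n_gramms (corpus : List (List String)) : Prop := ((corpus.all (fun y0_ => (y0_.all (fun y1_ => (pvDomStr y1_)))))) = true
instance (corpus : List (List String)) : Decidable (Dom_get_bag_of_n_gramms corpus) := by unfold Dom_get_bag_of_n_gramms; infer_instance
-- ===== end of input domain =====

-- B replaces A's incremental counter loop by a per-word computation: each word's index is
-- the number of distinct words before its first occurrence (objective: alternative; B is O(n^2), not faster).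

-- ===== PORT A =====
-- literal port of A: build new_corpus by appending, then the counter loop over a dict
def get_bag_of_n_gramms (corpus : List (List String)) : List (String × Int) :=
  let new_corpus : List String :=
    corpus.foldl (fun acc item => item.foldl (fun acc2 n_gramm => acc2 ++ [n_gramm]) acc) []
  let st : PySem.Dict String Int × Int :=
    new_corpus.foldl
      (fun st word =>
        if st.1.contains word then st
        else (st.1.insert word st.2, st.2 + 1))
      (PySem.Dict.empty, 0)
  st.1.items

-- ===== PORT B =====
-- literal port of B: flatten comprehension, then a dict comprehension whose value for each word is
-- len(set(flat[:flat.index(word)])). flat.index(word) never raises here (word ∈ flat), so its port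
-- is (index? flat word).getD 0; flat[:k] with k = index? ≥ 0 is exactly List.take k.
def get_bag_of_n_gramms_alt (corpus : List (List String)) : List (String × Int) :=
  let flat : List String := corpus.flatMap (fun item => item)
  let d : PySem.Dict String Int :=
    flat.foldl
      (fun d word =>
        d.insert word
          (((PySem.Set.ofList (flat.take ((PySem.List.index? flat word).getD 0))).length : Int)))
      PySem.Dict.empty
  d.items

-- ===== PRECONDITION & SPEC =====
def Spec_get_bag_of_n_gramms (corpus : List (List String)) (out : List (String × Int)) : Prop := out = get_bag_of_n_gramms_alt corpus
instance (corpus : List (List String)) (out : List (String × Int)) : Decidable (Spec_get_bag_of_n_gramms corpus out) := by unfold Spec_get_bag_of_n_gramms; infer_instance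

-- ===== CLAIM (what is proved, stated in full; the proofs are below) =====
def Claim_equal_get_bag_of_n_gramms : Prop := ∀ (corpus : List (List String)), Dom_get_bag_of_n_gramms corpus → Spec_get_bag_of_n_gramms corpus (get_bag_of_n_gramms corpus)

-- ===== LEMMAS AND PROOFS =====

-- the dict A maintains, reconstructed from the list of seen-first words
def pvToDict (seen : List String) : PySem.Dict String Int :=
  PySem.Dict.mk ((PySem.List.enumerate seen 0).map (fun p => (p.2, p.1)))

theorem pvEnumerate_append_singleton {α : Type} (xs : List α) (x : α) (s : Int) :
    PySem.List.enumerate (xs ++ [x]) s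
      = PySem.List.enumerate xs s ++ [(s + xs.length, x)] := by
  induction xs generalizing s with
  | nil => simp [PySem.List.enumerate]
  | cons y ys ih =>
      simp [PySem.List.enumerate, ih (s + 1)]
      ring_nf

theorem pvToDict_contains (seen : List String) (w : String) :
    (pvToDict seen).contains w = seen.contains w := by
  suffices h : ∀ (s : Int), ((PySem.List.enumerate seen s).map
      (fun p => (p.2, p.1))).any (fun p => p.1 == w) = seen.contains w by
    simpa [pvToDict, PySem.Dict.contains] using h 0
  induction seen with
  | nil => intro s; simp [PySem.List.enumerate]
  | cons y ys ih =>
      intro s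
      simp only [PySem.List.enumerate, List.map_cons, List.any_cons, ih (s + 1),
        List.contains_cons]
      rw [Bool.eq_iff_iff]
      simp only [Bool.or_eq_true, beq_iff_eq]
      constructor <;> rintro (h | h)
      · exact Or.inl h.symm
      · exact Or.inr h
      · exact Or.inl h.symm
      · exact Or.inr h

-- the invariant tying A's loop to the Set.add fold (dedup)
theorem pvLoop_inv (ws seen : List String) :
    ws.foldl
        (fun st word =>
          if st.1.contains word then st
          else (st.1.insert word st.2, st.2 + 1))
        (pvToDict seen, (seen.length : Int))
      = (pvToDict (ws.foldl PySem.Set.add seen),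
         ((ws.foldl PySem.Set.add seen).length : Int)) := by
  induction ws generalizing seen with
  | nil => simp
  | cons w ws ih =>
      by_cases h : w ∈ seen
      · have hc : (pvToDict seen).contains w = true := by
          rw [pvToDict_contains]; simpa using h
        have hadd : PySem.Set.add seen w = seen := by
          simp [PySem.Set.add, PySem.Set.contains, h]
        simp only [List.foldl_cons]
        rw [if_pos (by simpa using hc), ih, hadd]
      · have hc : (pvToDict seen).contains w = false := by
          rw [pvToDict_contains]; simpa using h
        have hins : (pvToDict seen).insert w (seen.length : Int)
            = pvToDict (seen ++ [w]) := by
          unfold PySem.Dict.insert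
          rw [hc]
          simp [pvToDict, pvEnumerate_append_singleton]
        have hadd : PySem.Set.add seen w = seen ++ [w] := by
          simp [PySem.Set.add, PySem.Set.contains, h]
        have hpair : ((pvToDict seen).insert w (seen.length : Int), (seen.length : Int) + 1)
            = (pvToDict (seen ++ [w]), (((seen ++ [w]).length : Nat) : Int)) := by
          rw [hins]; simp
        simp only [List.foldl_cons]
        rw [if_neg (by simp [hc]), hpair, ih, hadd]

-- dedup over an appended element is Set.add
theorem pvDedup_append_singleton (p : List String) (w : String) :
    PySem.List.dedup (p ++ [w]) = PySem.Set.add (PySem.List.dedup p) w := by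
  simp only [PySem.List.dedup_eq_ofList, PySem.Set.ofList_eq_foldl, List.foldl_append,
    List.foldl_cons, List.foldl_nil]

-- the first-occurrence index of w inside dedup p is the number of distinct words
-- strictly before w's first occurrence in p
theorem pvIndex_dedup (p : List String) (w : String) (k : Nat)
    (hk : PySem.List.index? p w = some k) :
    PySem.List.index? (PySem.List.dedup p) w
      = some (PySem.List.dedup (p.take k)).length := by
  induction p using List.reverseRecOn generalizing k with
  | nil => simp [PySem.List.index?] at hk
  | append_singleton q x ih =>
      by_cases hq : w ∈ q
      · have hkq : PySem.List.index? q w = some k := by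
          rwa [PySem.List.index?_append_of_mem _ hq] at hk
        obtain ⟨hklt, -, -⟩ := PySem.List.getElem_of_index?_eq_some hkq
        have htake : (q ++ [x]).take k = q.take k :=
          List.take_append_of_le_length (Nat.le_of_lt hklt)
        rw [htake, pvDedup_append_singleton]
        by_cases hxd : PySem.Set.contains (PySem.List.dedup q) x = true
        · simp only [PySem.Set.add, hxd, if_pos]
          exact ih k hkq
        · simp only [PySem.Set.add]
          rw [if_neg hxd,
            PySem.List.index?_append_of_mem _ (by simpa [PySem.List.mem_dedup] using hq)]
          exact ih k hkq
      · have hwx : w = x := by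
          have hmem : w ∈ q ++ [x] :=
            (PySem.List.index?_isSome_iff (q ++ [x]) w).mp (by rw [hk]; rfl)
          rcases List.mem_append.mp hmem with h | h
          · exact absurd h hq
          · simpa using h
        subst hwx
        have hkq : k = q.length := by
          have := PySem.List.index?_append_singleton_self q w hq
          rw [hk] at this; exact Option.some.inj this
        subst hkq
        have hwd : w ∉ PySem.List.dedup q := by simpa [PySem.List.mem_dedup] using hq
        rw [List.take_left, pvDedup_append_singleton]
        simp only [PySem.Set.add]
        rw [if_neg (by simpa [PySem.Set.contains] using hwd)]
        exact PySem.List.index?_append_singleton_self _ w hwd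

-- in a list of pairs with distinct first components, the first component determines the pair
theorem pvNodupFst_eq {α β : Type} {l : List (α × β)} (h : (l.map Prod.fst).Nodup)
    {a : α} {b c : β} (h1 : (a, b) ∈ l) (h2 : (a, c) ∈ l) : b = c := by
  induction l with
  | nil => cases h1
  | cons p l ih =>
      simp only [List.map_cons, List.nodup_cons] at h
      rcases List.mem_cons.mp h1 with h1' | h1' <;>
        rcases List.mem_cons.mp h2 with h2' | h2'
      · exact congrArg Prod.snd (h1'.trans h2'.symm)
      · exact absurd (List.mem_map.mpr ⟨(a, c), h2', by rw [← h1']⟩) h.1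
      · exact absurd (List.mem_map.mpr ⟨(a, b), h1', by rw [← h2']⟩) h.1
      · exact ih h.2 h1' h2'

-- inserting a pair the dict already holds changes nothing
theorem pvInsert_mem_eq {ν : Type} (d : PySem.Dict String ν) (w : String) (v : ν)
    (hnd : d.keys.Nodup) (hmem : (w, v) ∈ d.items) : d.insert w v = d := by
  apply PySem.Dict.ext
  rw [PySem.Dict.items_insert_of_contains d v
    ((PySem.Dict.contains_iff_mem_keys d w).mpr (PySem.Dict.mem_keys_of_mem_items d hmem))]
  conv_rhs => rw [← List.map_id d.items]
  apply List.map_congr_left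
  intro p hp
  by_cases hw : p.1 = w
  · have hv : p.2 = v := pvNodupFst_eq hnd (hw ▸ (show (p.1, p.2) ∈ d.items by simpa using hp)) hmem
    simp only [hw, if_pos (beq_self_eq_true w), id]
    rw [← hw, ← hv]
  · simp [hw]

theorem pvNodup_keys_toDict (l : List String) (hnd : l.Nodup) :
    (pvToDict l).keys.Nodup := by
  have hkeys : (pvToDict l).keys = l := by
    show ((PySem.List.enumerate l 0).map (fun p => (p.2, p.1))).map Prod.fst = l
    rw [List.map_map]
    exact PySem.List.map_snd_enumerate l 0
  rw [hkeys]; exact hnd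

-- B's fold invariant: folding the inserts over a suffix s of flat, starting from the
-- dict for the processed prefix p, lands on the dict for all of flat
theorem pvBLoop_inv (flat s p : List String) (hsplit : flat = p ++ s) :
    s.foldl
        (fun d word =>
          d.insert word
            (((PySem.Set.ofList (flat.take ((PySem.List.index? flat word).getD 0))).length : Int)))
        (pvToDict (PySem.List.dedup p))
      = pvToDict (PySem.List.dedup flat) := by
  induction s generalizing p with
  | nil => rw [hsplit]; simp
  | cons w s' ih =>
      have hsplit' : flat = (p ++ [w]) ++ s' := by simp [hsplit]
      rw [List.foldl_cons]
      have hstep : (pvToDict (PySem.List.dedup p)).insert w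
          (((PySem.Set.ofList (flat.take ((PySem.List.index? flat w).getD 0))).length : Int))
          = pvToDict (PySem.List.dedup (p ++ [w])) := by
        by_cases hp : w ∈ p
        · -- w already seen: the inserted value equals the stored index, so insert is a no-op
          obtain ⟨k, hk⟩ := Option.isSome_iff_exists.mp
            ((PySem.List.index?_isSome_iff p w).mpr hp)
          have hkflat : PySem.List.index? flat w = some k := by
            rw [hsplit, PySem.List.index?_append_of_mem _ hp]; exact hk
          obtain ⟨hklt, -, -⟩ := PySem.List.getElem_of_index?_eq_some hk
          have htake : flat.take k = p.take k := by
            rw [hsplit]; exact List.take_append_of_le_length (Nat.le_of_lt hklt)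
          have hidx := pvIndex_dedup p w k hk
          obtain ⟨hjlt, hjw, -⟩ := PySem.List.getElem_of_index?_eq_some hidx
          have hmem : (w, (((PySem.List.dedup (p.take k)).length : Nat) : Int))
              ∈ (pvToDict (PySem.List.dedup p)).items := by
            show _ ∈ (PySem.List.enumerate (PySem.List.dedup p) 0).map (fun q => (q.2, q.1))
            refine List.mem_map.mpr
              ⟨((((PySem.List.dedup (p.take k)).length : Nat) : Int), w), ?_, rfl⟩
            rw [PySem.List.mem_enumerate_iff]
            exact ⟨(PySem.List.dedup (p.take k)).length, hjlt, by rw [hjw]; simp⟩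
          have hval : ((PySem.Set.ofList (flat.take ((PySem.List.index? flat w).getD 0))).length : Int)
              = (((PySem.List.dedup (p.take k)).length : Nat) : Int) := by
            rw [hkflat]
            simp only [Option.getD_some, htake, ← PySem.List.dedup_eq_ofList]
          have hdedup : PySem.List.dedup (p ++ [w]) = PySem.List.dedup p := by
            rw [pvDedup_append_singleton]
            simp only [PySem.Set.add]
            rw [if_pos (by
              simpa [PySem.Set.contains] using (PySem.List.mem_dedup p w).mpr hp)]
          rw [hval, hdedup]
          exact pvInsert_mem_eq _ _ _
            (pvNodup_keys_toDict _ (PySem.List.nodup_dedup p)) hmem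
        · -- w is new: first occurrence is at position p.length; the insert appends
          have hkflat : PySem.List.index? flat w = some p.length := by
            rw [hsplit]
            exact (PySem.List.index?_eq_some_iff _ w p.length).mpr ⟨p, s', rfl, rfl, hp⟩
          have htake : flat.take p.length = p := by
            rw [hsplit]; exact List.take_left
          have hwd : w ∉ PySem.List.dedup p := by simpa [PySem.List.mem_dedup] using hp
          have hc : (pvToDict (PySem.List.dedup p)).contains w = false := by
            rw [pvToDict_contains]; simpa using hwd
          have hval : ((PySem.Set.ofList (flat.take ((PySem.List.index? flat w).getD 0))).length : Int)
              = ((PySem.List.dedup p).length : Int) := by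
            rw [hkflat]
            simp only [Option.getD_some, htake, ← PySem.List.dedup_eq_ofList]
          have hdedup : PySem.List.dedup (p ++ [w]) = PySem.List.dedup p ++ [w] := by
            rw [pvDedup_append_singleton]
            simp only [PySem.Set.add]
            rw [if_neg (by simpa [PySem.Set.contains] using hwd)]
          rw [hval, hdedup]
          unfold PySem.Dict.insert
          rw [hc]
          simp [pvToDict, pvEnumerate_append_singleton]
      rw [hstep]
      exact ih (p ++ [w]) hsplit'

-- ===== VERDICT (by name: the statement is the Claim_ definition above) =====
theorem get_bag_of_n_gramms_spec : Claim_equal_get_bag_of_n_gramms := by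
  intro corpus _
  unfold Spec_get_bag_of_n_gramms get_bag_of_n_gramms get_bag_of_n_gramms_alt
  have hfun : (fun (acc : List String) item =>
        item.foldl (fun acc2 n_gramm => acc2 ++ [n_gramm]) acc)
      = (fun acc item => acc ++ (fun item => item) item) := by
    funext acc item
    exact PySem.List.foldl_append_singleton item acc
  have hflat : corpus.foldl (fun acc item => item.foldl (fun acc2 n_gramm => acc2 ++ [n_gramm]) acc) []
      = corpus.flatMap (fun item => item) := by
    rw [hfun, PySem.List.foldl_append_eq_flatMap]
    simp
  have hA := pvLoop_inv (corpus.flatMap (fun item => item)) []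
  have hB := pvBLoop_inv (corpus.flatMap (fun item => item))
      (corpus.flatMap (fun item => item)) [] (by simp)
  simp only [hflat]
  have h0 : pvToDict [] = PySem.Dict.empty := by
    simp [pvToDict, PySem.List.enumerate, PySem.Dict.empty]
  rw [show ((PySem.Dict.empty : PySem.Dict String Int), (0 : Int))
        = (pvToDict [], (([] : List String).length : Int)) by simp [h0], hA]
  rw [show (PySem.Dict.empty : PySem.Dict String Int) = pvToDict (PySem.List.dedup []) by
    simp [h0, PySem.List.dedup, PySem.Set.ofList], hB]
  simp [PySem.List.dedup, PySem.Set.ofList, PySem.Set.empty]
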